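-- pv_equiv track=rewrite | github.com/blacknon/pywhois2 | pywhois2/common.py | build_key_candidates
-- ===== SOURCE A (Python) =====
-- def build_key_candidates(target_key: str) -> list[str]:
--     if not target_key:
--         return []
--
--     key_elements = [element for element in target_key.split(".") if element]
--     candidates: list[str] = []
--     for index in range(len(key_elements)):
--         candidates.append(".".join(key_elements[index:]))
--     return candidates
-- ===== SOURCE B (Python) =====
-- def build_key_candidates(target_key: str) -> list[str]:
--     if not target_key:
--         return []
--
--     key_elements = [element for element in target_key.split(".") if element]
--     out: list[str] = []
--     acc = ""
--     for element in reversed(key_elements):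
--         acc = element if not acc else element + "." + acc
--         out.append(acc)
--     out.reverse()
--     return out
-- ===== Notes on version B (the rewrite author's own statement) =====
-- stated objective: alternative
-- what changed: Instead of joining a freshly sliced suffix for every start index, B walks the elements once in reverse keeping a running dot-joined suffix accumulator, collects each accumulator value and reverses the collected list at the end.
import Mathlib
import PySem

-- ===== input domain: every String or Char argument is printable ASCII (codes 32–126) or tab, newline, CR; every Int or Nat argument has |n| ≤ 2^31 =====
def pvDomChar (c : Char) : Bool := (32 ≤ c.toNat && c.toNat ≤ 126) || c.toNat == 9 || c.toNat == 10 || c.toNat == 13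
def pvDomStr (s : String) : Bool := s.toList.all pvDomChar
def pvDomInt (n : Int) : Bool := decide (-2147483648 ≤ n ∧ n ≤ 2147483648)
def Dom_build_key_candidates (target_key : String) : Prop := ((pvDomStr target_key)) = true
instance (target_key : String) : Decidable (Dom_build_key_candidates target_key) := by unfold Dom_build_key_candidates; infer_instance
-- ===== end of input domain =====

-- B replaces per-index slice+join with one reverse pass keeping a running dot-joined suffix accumulator (alternative decomposition, same cost).

-- ===== PORT A =====
def build_key_candidates (target_key : String) : List String :=
  if target_key = "" then []
  else
    let key_elements := ((PySem.Str.split? target_key ".").getD []).filter (fun element => element ≠ "")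
    let candidates : List String :=
      (PySem.List.pyRange 0 (key_elements.length) 1).foldl
        (fun candidates index =>
          candidates ++ [PySem.Str.join "." (PySem.List.slice key_elements (some index) none)]) []
    candidates

-- ===== PORT B =====
def build_key_candidates_alt (target_key : String) : List String :=
  if target_key = "" then []
  else
    let key_elements := ((PySem.Str.split? target_key ".").getD []).filter (fun element => element ≠ "")
    let st :=
      key_elements.reverse.foldl
        (fun (st : List String × String) element =>
          let acc := if st.2 = "" then element else element ++ "." ++ st.2
          (st.1 ++ [acc], acc)) ([], "")
    st.1.reverse

-- ===== PRECONDITION & SPEC =====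
def Spec_build_key_candidates (target_key : String) (out : List String) : Prop := out = build_key_candidates_alt target_key
instance (target_key : String) (out : List String) : Decidable (Spec_build_key_candidates target_key out) := by unfold Spec_build_key_candidates; infer_instance

-- ===== CLAIM (what is proved, stated in full; the proofs are below) =====
def Claim_equal_build_key_candidates : Prop := ∀ (target_key : String), Dom_build_key_candidates target_key → Spec_build_key_candidates target_key (build_key_candidates target_key)

-- ===== LEMMAS AND PROOFS =====

-- dot-joins of all suffixes, head first
def pvSfx : List String → List String
  | [] => []
  | e :: r => PySem.Str.join "." (e :: r) :: pvSfx r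

theorem pv_join_nil : PySem.Str.join "." ([] : List String) = "" := by
  rfl

theorem pv_join_single (e : String) : PySem.Str.join "." [e] = e := by
  simp [PySem.Str.join, PySem.Chars.join, List.intercalate]

theorem pv_join_cons (e : String) (r : List String) (hr : r ≠ []) :
    PySem.Str.join "." (e :: r) = e ++ "." ++ PySem.Str.join "." r := by
  obtain ⟨x, r', rfl⟩ := List.exists_cons_of_ne_nil hr
  apply String.toList_injective
  simp [PySem.Str.join, PySem.Chars.join, List.intercalate]

theorem pv_join_ne_empty (x : String) (hx : x ≠ "") (r : List String) :
    PySem.Str.join "." (x :: r) ≠ "" := by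
  intro h
  rcases r with _ | ⟨y, r'⟩
  · rw [pv_join_single] at h
    exact hx h
  · rw [pv_join_cons x (y :: r') (by simp)] at h
    have := congrArg String.toList h
    simp at this

-- the B loop (folded from the right) produces (reversed suffix list, join of the whole list)
theorem pv_foldr_spec (es : List String) (hes : ∀ e ∈ es, e ≠ "") :
    es.foldr
      (fun element (st : List String × String) =>
        let acc := if st.2 = "" then element else element ++ "." ++ st.2
        (st.1 ++ [acc], acc)) ([], "")
      = ((pvSfx es).reverse, PySem.Str.join "." es) := by
  induction es with
  | nil => simp [pvSfx, pv_join_nil]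
  | cons e r ih =>
    have hr : ∀ x ∈ r, x ≠ "" := fun x hx => hes x (List.mem_cons_of_mem _ hx)
    have he : e ≠ "" := hes e (List.mem_cons_self ..)
    simp only [List.foldr_cons, ih hr]
    rcases r with _ | ⟨x, r'⟩
    · simp [pvSfx, pv_join_nil, pv_join_single]
    · have hne : PySem.Str.join "." (x :: r') ≠ "" :=
        pv_join_ne_empty x (hr x (List.mem_cons_self ..)) r'
      simp only [hne, pvSfx, List.reverse_cons]
      rw [pv_join_cons e (x :: r') (by simp)]
      simp

theorem pv_foldl_append {α : Type} (l : List α) (f : α → String) (init : List String) :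
    l.foldl (fun acc i => acc ++ [f i]) init = init ++ l.map f := by
  induction l generalizing init with
  | nil => simp
  | cons x xs ih => simp [ih]

-- A's map-of-range form equals the suffix list
theorem pv_map_range_drop (es : List String) :
    (List.range es.length).map (fun k => PySem.Str.join "." (es.drop k)) = pvSfx es := by
  induction es with
  | nil => simp [pvSfx]
  | cons e r ih =>
    rw [List.length_cons, List.range_succ_eq_map]
    simp only [List.map_cons, List.map_map, List.drop_zero]
    refine congrArg₂ _ rfl ?_
    simpa [Function.comp] using ih

-- ===== VERDICT (by name: the statement is the Claim_ definition above) =====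
theorem build_key_candidates_spec : Claim_equal_build_key_candidates := by
  intro target_key _
  unfold Spec_build_key_candidates build_key_candidates build_key_candidates_alt
  by_cases h : target_key = ""
  · simp [h]
  · simp only [if_neg h]
    set es := ((PySem.Str.split? target_key ".").getD []).filter (fun element => element ≠ "") with hes
    have hne : ∀ e ∈ es, e ≠ "" := by
      intro e he
      have := (List.mem_filter.mp (hes ▸ he)).2
      simpa using this
    -- A side: the foldl of appended joins is the suffix list
    have hA : (PySem.List.pyRange 0 (es.length) 1).foldl
        (fun candidates index =>
          candidates ++ [PySem.Str.join "." (PySem.List.slice es (some index) none)]) []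
        = pvSfx es := by
      rw [PySem.List.pyRange_one, List.foldl_map,
        pv_foldl_append (f := fun k : Nat =>
          PySem.Str.join "." (PySem.List.slice es (some ((0 : Int) + (k : Int))) none))]
      simp only [List.nil_append]
      have hn : (((es.length : Int)) - 0).toNat = es.length := by omega
      rw [hn, ← pv_map_range_drop es]
      apply List.map_congr_left
      intro k _
      have h0 : (0 : Int) + (k : Int) = ((k : Nat) : Int) := by omega
      rw [h0, PySem.List.slice_from_natCast]
    -- B side: the reverse foldl is the reversed suffix list
    rw [hA, List.foldl_reverse, pv_foldr_spec es hne]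
    simp
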